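-- pv_equiv track=rewrite | github.com/adityadananjaya/connect4-API | c4manager/c4methods/c4functions.py | check_hv
-- ===== SOURCE A (Python) =====
-- def check_hv(rows, colour):
--     for row in rows:
--       for i in range(len(row) - 4 + 1):
--         winner = True
--         for j in range(4):
--           if(row[i + j] != colour):
--             winner = False
--             break
--         if winner:
--           return True
--     return False
-- ===== SOURCE B (Python) =====
-- def check_hv(rows, colour):
--     for row in rows:
--         run = 0
--         for cell in row:
--             if cell == colour:
--                 run += 1
--                 if run == 4:
--                     return True
--             else:
--                 run = 0
--     return False
-- ===== Notes on version B (the rewrite author's own statement) =====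
-- stated objective: simpler
-- what changed: Replaced the sliding-window double loop (every start index i, then an inner fixed-length window check of 4 cells) by a single left-to-right pass per row keeping a running count of consecutive cells equal to colour, returning True when the count reaches 4.
import Mathlib
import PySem

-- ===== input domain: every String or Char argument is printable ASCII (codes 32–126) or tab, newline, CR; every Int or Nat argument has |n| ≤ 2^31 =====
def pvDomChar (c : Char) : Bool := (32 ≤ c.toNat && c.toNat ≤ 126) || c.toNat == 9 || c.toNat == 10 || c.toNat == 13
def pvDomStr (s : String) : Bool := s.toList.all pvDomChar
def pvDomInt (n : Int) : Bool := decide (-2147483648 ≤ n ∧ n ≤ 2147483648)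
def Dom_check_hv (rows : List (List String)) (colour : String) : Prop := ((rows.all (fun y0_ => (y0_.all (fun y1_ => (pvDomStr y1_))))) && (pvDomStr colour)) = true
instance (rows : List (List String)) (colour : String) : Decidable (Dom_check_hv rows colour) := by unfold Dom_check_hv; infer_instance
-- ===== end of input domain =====

-- B replaces A's sliding-window-of-4 inner loop by one linear pass per row with a running
-- count of consecutive matches (objective: simpler; a timing run measured B faster by a constant factor).

-- ===== PORT A =====
-- A: for each row, for each start index i in range(len(row)-4+1), check the 4-cell window
-- (inner loop with early break = short-circuit `all`); early `return True` = `any`.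
def check_hv (rows : List (List String)) (colour : String) : Bool :=
  rows.any (fun row =>
    (PySem.List.pyRange 0 ((row.length : Int) - 4 + 1) 1).any (fun i =>
      (PySem.List.pyRange 0 4 1).all (fun j =>
        PySem.List.pyGet? row (i + j) == some colour)))

-- ===== PORT B =====
-- B: single pass over the row carrying the run length of consecutive matches.
def check_hv_runRow (colour : String) : List String → Nat → Bool
  | [], _ => false
  | cell :: rest, run =>
      if cell == colour then
        if run + 1 == 4 then true else check_hv_runRow colour rest (run + 1)
      else check_hv_runRow colour rest 0

def check_hv_alt (rows : List (List String)) (colour : String) : Bool :=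
  rows.any (fun row => check_hv_runRow colour row 0)

-- ===== PRECONDITION & SPEC =====
def Spec_check_hv (rows : List (List String)) (colour : String) (out : Bool) : Prop := out = check_hv_alt rows colour
instance (rows : List (List String)) (colour : String) (out : Bool) : Decidable (Spec_check_hv rows colour out) := by unfold Spec_check_hv; infer_instance

-- ===== CLAIM (what is proved, stated in full; the proofs are below) =====
def Claim_equal_check_hv : Prop := ∀ (rows : List (List String)) (colour : String), Dom_check_hv rows colour → Spec_check_hv rows colour (check_hv rows colour)

-- ===== LEMMAS AND PROOFS =====

-- infix = prefix of some drop
lemma infix_iff_prefix_drop {α : Type} (l r : List α) :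
    l <:+: r ↔ ∃ n, l <+: r.drop n := by
  rw [List.infix_iff_prefix_suffix]
  constructor
  · rintro ⟨t, hp, hs⟩
    exact ⟨r.length - t.length, by rwa [← List.suffix_iff_eq_drop.mp hs]⟩
  · rintro ⟨n, hp⟩
    exact ⟨r.drop n, hp, List.drop_suffix n r⟩

-- a 4-replicate is a prefix iff the first four lookups all hit colour
lemma prefix4_iff (colour : String) (ys : List String) :
    List.replicate 4 colour <+: ys ↔
      (ys[0]? = some colour ∧ ys[1]? = some colour ∧ ys[2]? = some colour ∧ ys[3]? = some colour) := by
  have h4 : List.replicate 4 colour = [colour, colour, colour, colour] := rfl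
  rw [h4]
  rcases ys with _ | ⟨a, _ | ⟨b, _ | ⟨c, _ | ⟨d, t⟩⟩⟩⟩
  · simp
  · simp [List.cons_prefix_cons]
  · simp [List.cons_prefix_cons]
  · simp [List.cons_prefix_cons]
  · simp [List.cons_prefix_cons, eq_comm]

-- A-side characterisation: the window scan finds a window iff replicate 4 colour is an infix
lemma check_hv_row_iff (colour : String) (row : List String) :
    ((PySem.List.pyRange 0 ((row.length : Int) - 4 + 1) 1).any (fun i =>
      (PySem.List.pyRange 0 4 1).all (fun j =>
        PySem.List.pyGet? row (i + j) == some colour))) = true ↔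
    List.replicate 4 colour <:+: row := by
  rw [List.any_eq_true]
  have h4 : PySem.List.pyRange 0 4 1 = [0, 1, 2, 3] := by decide
  rw [infix_iff_prefix_drop]
  constructor
  · rintro ⟨i, hmem, hall⟩
    rw [PySem.List.mem_pyRange_one] at hmem
    obtain ⟨h0, hlt⟩ := hmem
    rw [h4] at hall
    simp only [List.all_cons, List.all_nil, Bool.and_true, Bool.and_eq_true, beq_iff_eq] at hall
    obtain ⟨g0, g1, g2, g3⟩ := hall
    refine ⟨i.toNat, (prefix4_iff colour _).mpr ⟨?_, ?_, ?_, ?_⟩⟩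
    · rw [List.getElem?_drop]
      rw [show i + 0 = ((i.toNat + 0 : Nat) : Int) by omega, PySem.List.pyGet?_natCast] at g0
      exact g0
    · rw [List.getElem?_drop]
      rw [show i + 1 = ((i.toNat + 1 : Nat) : Int) by omega, PySem.List.pyGet?_natCast] at g1
      exact g1
    · rw [List.getElem?_drop]
      rw [show i + 2 = ((i.toNat + 2 : Nat) : Int) by omega, PySem.List.pyGet?_natCast] at g2
      exact g2
    · rw [List.getElem?_drop]
      rw [show i + 3 = ((i.toNat + 3 : Nat) : Int) by omega, PySem.List.pyGet?_natCast] at g3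
      exact g3
  · rintro ⟨n, hp⟩
    have hg := (prefix4_iff colour _).mp hp
    have hlen4 : 4 ≤ row.length - n := by
      have := hp.length_le
      simpa using this
    have hnlen : n + 4 ≤ row.length := by omega
    refine ⟨(n : Int), ?_, ?_⟩
    · rw [PySem.List.mem_pyRange_one]
      constructor
      · positivity
      · have : (n : Int) + 4 ≤ (row.length : Int) := by exact_mod_cast hnlen
        omega
    · rw [h4]
      simp only [List.all_cons, List.all_nil, Bool.and_true, Bool.and_eq_true, beq_iff_eq]
      obtain ⟨g0, g1, g2, g3⟩ := hg
      rw [List.getElem?_drop] at g0 g1 g2 g3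
      refine ⟨?_, ?_, ?_, ?_⟩
      · rw [show (n : Int) + 0 = ((n + 0 : Nat) : Int) by push_cast; ring, PySem.List.pyGet?_natCast]
        exact g0
      · rw [show (n : Int) + 1 = ((n + 1 : Nat) : Int) by push_cast; ring, PySem.List.pyGet?_natCast]
        exact g1
      · rw [show (n : Int) + 2 = ((n + 2 : Nat) : Int) by push_cast; ring, PySem.List.pyGet?_natCast]
        exact g2
      · rw [show (n : Int) + 3 = ((n + 3 : Nat) : Int) by push_cast; ring, PySem.List.pyGet?_natCast]
        exact g3

-- B-side characterisation
lemma check_hv_runRow_iff (colour : String) (row : List String) (run : Nat) (h : run ≤ 3) :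
    check_hv_runRow colour row run = true ↔
      (List.replicate (4 - run) colour <+: row ∨ List.replicate 4 colour <:+: row) := by
  induction row generalizing run with
  | nil =>
    simp only [check_hv_runRow]
    constructor
    · intro hh; exact absurd hh (by simp)
    · rintro (hp | hi)
      · have := hp.length_le; simp at this; omega
      · have := hi.length_le; simp at this
  | cons c rest ih =>
    by_cases hc : c = colour
    · subst hc
      simp only [check_hv_runRow, beq_self_eq_true, if_true]
      by_cases h3 : run = 3
      · subst h3
        simp only [show ((3:Nat)+1 == 4) = true from rfl, if_true]
        constructor
        · intro _
          left
          show List.replicate 1 c <+: c :: rest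
          simp [List.replicate]
        · intro _; trivial
      · have hrun : run + 1 ≤ 3 := by omega
        have hif : (run + 1 == 4) = false := by
          simpa using (by omega : run + 1 ≠ 4)
        rw [hif]
        simp only [Bool.false_eq_true, if_false]
        rw [ih (run+1) hrun]
        have e1 : List.replicate (4 - run) c = c :: List.replicate (3 - run) c := by
          rw [show 4 - run = (3 - run) + 1 by omega, List.replicate_succ]
        have e2 : (4 : Nat) - (run + 1) = 3 - run := by omega
        rw [e1, e2, List.cons_prefix_cons, List.infix_cons_iff]
        have e3 : List.replicate 4 c = c :: List.replicate 3 c := rfl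
        rw [e3, List.cons_prefix_cons]
        have himp : List.replicate 3 c <+: rest → List.replicate (3 - run) c <+: rest := by
          intro hp
          refine List.IsPrefix.trans ?_ hp
          refine ⟨List.replicate run c, ?_⟩
          rw [← List.replicate_add]
          congr 1
          omega
        constructor
        · rintro (hp | hi)
          · exact Or.inl ⟨rfl, hp⟩
          · exact Or.inr (Or.inr hi)
        · rintro (⟨_, hp⟩ | (⟨_, hp⟩ | hi))
          · exact Or.inl hp
          · exact Or.inl (himp hp)
          · exact Or.inr hi
    · have hbc : (c == colour) = false := by simp [hc]
      simp only [check_hv_runRow, hbc, Bool.false_eq_true, if_false]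
      rw [ih 0 (by omega)]
      have hhead : ∀ k : Nat, 0 < k → ¬ (List.replicate k colour <+: c :: rest) := by
        intro k hk hp
        rcases k with _ | k'
        · omega
        · rw [List.replicate_succ, List.cons_prefix_cons] at hp
          exact hc hp.1.symm
      rw [List.infix_cons_iff]
      constructor
      · rintro (hp | hi)
        · exact Or.inr (Or.inr hp.isInfix)
        · exact Or.inr (Or.inr hi)
      · rintro (hp | (hp | hi))
        · exact absurd hp (hhead _ (by omega))
        · exact absurd hp (hhead _ (by omega))
        · exact Or.inr hi

lemma row_agree (colour : String) (row : List String) :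
    ((PySem.List.pyRange 0 ((row.length : Int) - 4 + 1) 1).any (fun i =>
      (PySem.List.pyRange 0 4 1).all (fun j =>
        PySem.List.pyGet? row (i + j) == some colour))) = check_hv_runRow colour row 0 := by
  rcases hB : check_hv_runRow colour row 0 with _ | _
  · rcases hA : (PySem.List.pyRange 0 ((row.length : Int) - 4 + 1) 1).any (fun i =>
      (PySem.List.pyRange 0 4 1).all (fun j =>
        PySem.List.pyGet? row (i + j) == some colour)) with _ | _
    · rfl
    · exfalso
      have := (check_hv_row_iff colour row).mp hA
      have hb := (check_hv_runRow_iff colour row 0 (by omega)).mpr (Or.inr this)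
      rw [hB] at hb; exact Bool.false_ne_true hb
  · have hw := (check_hv_runRow_iff colour row 0 (by omega)).mp hB
    have : List.replicate 4 colour <:+: row := by
      rcases hw with hp | hi
      · exact (by simpa using hp : List.replicate 4 colour <+: row).isInfix
      · exact hi
    exact (check_hv_row_iff colour row).mpr this

-- ===== VERDICT (by name: the statement is the Claim_ definition above) =====
theorem check_hv_spec : Claim_equal_check_hv := by
  intro rows colour _
  unfold Spec_check_hv check_hv check_hv_alt
  congr 1
  funext row
  exact row_agree colour row
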